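-- pv_equiv track=rewrite | github.com/jerrt2003/leetcode-in-python | 1055. Shortest Way to Form String/greedy.py | shortestWay
-- ===== SOURCE A (Python) =====
-- def shortestWay(source, target):
--     """
--     Greedy
--     T:O(mn) S:O(m)
--     Runtime: 52 ms, faster than 24.86% of Python online submissions for Shortest Way to Form String.
--     Memory Usage: 12.9 MB, less than 100.00% of Python online submissions for Shortest Way to Form String.
--     :type source: str
--     :type target: str
--     :rtype: int
--     """
--     pt2 = 0
--     m,n = len(source),len(target)
--     char_in_source = set(source)
--     count = 0
--     while pt2 < len(target):
--         pt1 = 0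
--         while pt1 < m and pt2 < n:
--             if target[pt2] not in char_in_source:
--                 return -1
--             if source[pt1] == target[pt2]:
--                 pt1 += 1
--                 pt2 += 1
--             else:
--                 pt1 += 1
--         count += 1
--     return count
-- ===== SOURCE B (Python) =====
-- def shortestWay(source, target):
--     # Precompute for each char its ascending list of positions in source;
--     # walk target once, binary-searching the next occurrence, counting wraparounds.
--     pos = {}
--     for i, c in enumerate(source):
--         pos.setdefault(c, []).append(i)
--     count = 1
--     cur = 0
--     for c in target:
--         lst = pos.get(c, [])
--         if not lst:
--             return -1
--         # first index in lst whose value is >= cur (hand-written bisect_left)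
--         lo, hi = 0, len(lst)
--         while lo < hi:
--             mid = (lo + hi) // 2
--             if lst[mid] < cur:
--                 lo = mid + 1
--             else:
--                 hi = mid
--         if lo == len(lst):
--             count += 1
--             cur = lst[0] + 1
--         else:
--             cur = lst[lo] + 1
--     if not target:
--         return 0
--     return count
-- ===== Notes on version B (the rewrite author's own statement) =====
-- stated objective: alternative
-- what changed: Instead of rescanning source left-to-right for every pass (restarting at index 0 each time a pass ends), B precomputes a dict mapping each character to its ascending list of positions in source and walks target once, binary-searching the next usable position and counting wraparounds; better worst case in theory but not measurably faster on the generated inputs.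
import Mathlib
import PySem

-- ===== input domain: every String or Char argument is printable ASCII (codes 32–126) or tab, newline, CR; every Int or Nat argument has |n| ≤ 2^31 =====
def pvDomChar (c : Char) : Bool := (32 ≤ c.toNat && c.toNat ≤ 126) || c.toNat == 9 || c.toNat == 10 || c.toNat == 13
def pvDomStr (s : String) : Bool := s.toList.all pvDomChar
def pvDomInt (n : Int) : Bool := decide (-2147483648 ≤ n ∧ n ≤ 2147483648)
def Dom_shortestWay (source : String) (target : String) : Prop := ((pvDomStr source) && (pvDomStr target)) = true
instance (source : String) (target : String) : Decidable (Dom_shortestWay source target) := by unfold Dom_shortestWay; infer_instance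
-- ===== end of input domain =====

-- B replaces A's repeated pass-by-pass scans of `source` with a per-character dict of
-- ascending positions and a hand-written binary search, counting wraparounds (alternative
-- algorithm; a timing run did not measure it faster).

-- ===== PORT A =====
-- inner `while pt1 < m and pt2 < n` loop of A; returns none for `return -1`,
-- some pt2' for the value of pt2 when the inner loop exits
-- (fuel is only a structural totality guard: s.length + 1 steps always suffice, since
-- pt1 increases by one per iteration and the loop stops once pt1 = s.length)
def pvInnerA (s t : List Char) (S : PySem.Set Char) : Nat → Nat → Nat → Option Nat
  | 0, _, pt2 => some pt2
  | fuel + 1, pt1, pt2 =>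
    if pt1 < s.length ∧ pt2 < t.length then
      if PySem.Set.contains S (t.getD pt2 ' ') then
        if s.getD pt1 ' ' = t.getD pt2 ' ' then pvInnerA s t S fuel (pt1 + 1) (pt2 + 1)
        else pvInnerA s t S fuel (pt1 + 1) pt2
      else none
    else some pt2

-- outer `while pt2 < len(target)` loop of A; fuel t.length + 1 suffices whenever the
-- Python loop terminates (each pass advances pt2 by at least one)
def pvOuterA (s t : List Char) (S : PySem.Set Char) : Nat → Nat → Int → Int
  | 0, _, count => count
  | fuel + 1, pt2, count =>
    if pt2 < t.length then
      match pvInnerA s t S (s.length + 1) 0 pt2 with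
      | none => -1
      | some pt2' => pvOuterA s t S fuel pt2' (count + 1)
    else count

def shortestWay (source : String) (target : String) : Int :=
  pvOuterA source.toList target.toList (PySem.Set.ofList source.toList)
    (target.toList.length + 1) 0 0

-- ===== PORT B =====
-- `for i, c in enumerate(source): pos.setdefault(c, []).append(i)`
-- (indices are paired with their characters via zipIdx; they are the nonnegative ints 0..m-1)
def pvBuildPos (s : List Char) : PySem.Dict Char (List Nat) :=
  s.zipIdx.foldl (fun d p => d.modify p.1 [] (fun l => l ++ [p.2])) PySem.Dict.empty

-- the hand-written bisect_left loop of B: first index in lst[lo:hi] whose value is ≥ cur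
-- (fuel is only a structural totality guard: the interval shrinks every step, so
-- lst.length + 1 steps always suffice)
def pvBisect (lst : List Nat) (cur : Nat) : Nat → Nat → Nat → Nat
  | 0, lo, _ => lo
  | fuel + 1, lo, hi =>
    if lo < hi then
      if lst.getD ((lo + hi) / 2) 0 < cur then pvBisect lst cur fuel ((lo + hi) / 2 + 1) hi
      else pvBisect lst cur fuel lo ((lo + hi) / 2)
    else lo

-- one iteration of B's `for c in target` loop; state none = `return -1` already taken
def pvStepB (pos : PySem.Dict Char (List Nat)) (st : Option (Int × Nat)) (c : Char) :
    Option (Int × Nat) :=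
  match st with
  | none => none
  | some (count, cur) =>
    let lst := pos.getD c []
    if lst = [] then none
    else
      let lo := pvBisect lst cur (lst.length + 1) 0 lst.length
      if lo = lst.length then some (count + 1, lst.getD 0 0 + 1)
      else some (count, lst.getD lo 0 + 1)

def shortestWay_alt (source : String) (target : String) : Int :=
  let pos := pvBuildPos source.toList
  match target.toList.foldl (pvStepB pos) (some (1, 0)) with
  | none => -1
  | some (count, _) => if target.toList = [] then 0 else count

-- ===== PRECONDITION & SPEC =====
-- A's outer while-loop never terminates when source = "" and target ≠ "" (the inner loop
-- cannot run and pt2 never advances): exactly those inputs are excluded.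
def Pre_shortestWay (source : String) (target : String) : Prop :=
  source ≠ "" ∨ target = ""
instance (source : String) (target : String) : Decidable (Pre_shortestWay source target) := by
  unfold Pre_shortestWay; infer_instance

def pvWitness_shortestWay : String × String := ("abc", "abcbc")

def Spec_shortestWay (source : String) (target : String) (out : Int) : Prop :=
  out = shortestWay_alt source target
instance (source : String) (target : String) (out : Int) :
    Decidable (Spec_shortestWay source target out) := by unfold Spec_shortestWay; infer_instance

-- ===== CLAIM (what is proved, stated in full; the proofs are below) =====
def Claim_equal_shortestWay : Prop := ∀ (source : String) (target : String),
  Dom_shortestWay source target → Pre_shortestWay source target →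
  Spec_shortestWay source target (shortestWay source target)

-- ===== LEMMAS AND PROOFS =====

-- occFrom c s k = positions (offset by k) of c in s, in increasing order; the common
-- reference both ports are reduced to
def occFrom (c : Char) : List Char → Nat → List Nat
  | [], _ => []
  | a :: rest, k => if a = c then k :: occFrom c rest (k + 1) else occFrom c rest (k + 1)

-- first occurrence of c in s at index ≥ i (A's inner scan, per character)
def pvNxt (s : List Char) (c : Char) (i : Nat) : Option Nat :=
  if h : i < s.length then (if s[i] = c then some i else pvNxt s c (i + 1)) else none
termination_by s.length - i
decreasing_by omega

-- reference per-target-character recursion both ports are proved equal to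
def pvF (s : List Char) : List Char → Nat → Int → Int
  | [], _, count => count
  | c :: rest, cur, count =>
    match pvNxt s c cur with
    | some j => pvF s rest (j + 1) count
    | none =>
      match pvNxt s c 0 with
      | some j => pvF s rest (j + 1) (count + 1)
      | none => -1

lemma occFrom_lb {c : Char} : ∀ (s : List Char) (k : Nat), ∀ j ∈ occFrom c s k, k ≤ j := by
  intro s; induction s with
  | nil => intro k j hj; simp [occFrom] at hj
  | cons a rest ih =>
    intro k j hj
    simp only [occFrom] at hj
    split at hj
    · rcases List.mem_cons.mp hj with rfl | hj
      · omega
      · have := ih (k + 1) j hj; omega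
    · have := ih (k + 1) j hj; omega

lemma occFrom_ub {c : Char} : ∀ (s : List Char) (k : Nat), ∀ j ∈ occFrom c s k, j < k + s.length := by
  intro s; induction s with
  | nil => intro k j hj; simp [occFrom] at hj
  | cons a rest ih =>
    intro k j hj
    simp only [occFrom] at hj
    split at hj
    · rcases List.mem_cons.mp hj with rfl | hj
      · simp
      · have := ih (k + 1) j hj; simp; omega
    · have := ih (k + 1) j hj; simp; omega

lemma occFrom_nil_iff {c : Char} : ∀ (s : List Char) (k : Nat), occFrom c s k = [] ↔ c ∉ s := by
  intro s; induction s with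
  | nil => intro k; simp [occFrom]
  | cons a rest ih =>
    intro k
    simp only [occFrom]
    split
    · rename_i h; simp [h]
    · rename_i h
      have hca : c ≠ a := fun hc => h hc.symm
      rw [ih (k+1)]; simp [List.mem_cons, hca]

lemma occFrom_split {c : Char} : ∀ (s : List Char) (k i : Nat),
    occFrom c s k = occFrom c (s.take i) k ++ occFrom c (s.drop i) (k + i) := by
  intro s; induction s with
  | nil => intro k i; simp [occFrom]
  | cons a rest ih =>
    intro k i
    cases i with
    | zero => simp [occFrom]
    | succ i' =>
      simp only [List.take_succ_cons, List.drop_succ_cons, occFrom]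
      split
      · rw [ih (k+1) i']; simp; ring_nf
      · rw [ih (k+1) i']; ring_nf

lemma pvNxt_pos {s : List Char} {c : Char} {i : Nat} (h : i < s.length) :
    pvNxt s c i = (if s[i] = c then some i else pvNxt s c (i + 1)) := by
  rw [pvNxt]; simp [h]

lemma pvNxt_neg {s : List Char} {c : Char} {i : Nat} (h : ¬ i < s.length) :
    pvNxt s c i = none := by
  rw [pvNxt]; simp [h]

lemma pvNxt_eq_head_fuel (s : List Char) (c : Char) : ∀ fuel i, s.length - i ≤ fuel →
    pvNxt s c i = (occFrom c (s.drop i) i).head? := by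
  intro fuel
  induction fuel with
  | zero =>
    intro i hi
    have h : ¬ i < s.length := by omega
    rw [pvNxt_neg h, List.drop_eq_nil_of_le (by omega)]
    simp [occFrom]
  | succ f ih =>
    intro i hi
    by_cases h : i < s.length
    · rw [pvNxt_pos h, List.drop_eq_getElem_cons h]
      by_cases hc : s[i] = c
      · simp [occFrom, hc]
      · simp only [occFrom, if_neg hc]
        rw [ih (i + 1) (by omega)]
    · rw [pvNxt_neg h, List.drop_eq_nil_of_le (by omega)]
      simp [occFrom]

lemma pvNxt_eq_head (s : List Char) (c : Char) (i : Nat) :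
    pvNxt s c i = (occFrom c (s.drop i) i).head? :=
  pvNxt_eq_head_fuel s c (s.length - i) i le_rfl

lemma pvNxt_none_iff (s : List Char) (c : Char) (i : Nat) :
    pvNxt s c i = none ↔ c ∉ s.drop i := by
  rw [pvNxt_eq_head, List.head?_eq_none_iff, occFrom_nil_iff]

-- pvBisect on a list split into a `< cur` prefix and a `≥ cur` suffix finds the split point
lemma pvBisect_eq_fuel (P Q : List Nat) (cur : Nat)
    (hP : ∀ j ∈ P, j < cur) (hQ : ∀ j ∈ Q, cur ≤ j) :
    ∀ fuel lo hi, hi - lo ≤ fuel → lo ≤ P.length → P.length ≤ hi →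
      hi ≤ P.length + Q.length → pvBisect (P ++ Q) cur fuel lo hi = P.length := by
  intro fuel
  induction fuel with
  | zero =>
    intro lo hi h0 h1 h2 h3
    simp only [pvBisect]
    omega
  | succ f ih =>
    intro lo hi h0 h1 h2 h3
    by_cases hlh : lo < hi
    · rw [pvBisect]
      simp only [if_pos hlh]
      have hmid1 : lo ≤ (lo + hi) / 2 := by omega
      have hmid2 : (lo + hi) / 2 < hi := by omega
      have hmlen : (lo + hi) / 2 < (P ++ Q).length := by simp; omega
      rw [List.getD_eq_getElem _ 0 hmlen]
      by_cases hcase : (P ++ Q)[(lo + hi) / 2] < cur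
      · -- element < cur, hence the midpoint lies in P
        have hmP : (lo + hi) / 2 < P.length := by
          by_contra hge
          have hge' : P.length ≤ (lo + hi) / 2 := by omega
          have hx : (P ++ Q)[(lo + hi) / 2] ∈ Q := by
            rw [List.getElem_append_right hge']
            exact List.getElem_mem _
          have := hQ _ hx
          omega
        rw [if_pos hcase]
        exact ih _ hi (by omega) (by omega) h2 h3
      · -- element ≥ cur, hence the midpoint lies at or after P.length
        have hmP : P.length ≤ (lo + hi) / 2 := by
          by_contra hlt
          have hlt' : (lo + hi) / 2 < P.length := by omega
          have hx : (P ++ Q)[(lo + hi) / 2] ∈ P := by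
            rw [List.getElem_append_left hlt']
            exact List.getElem_mem _
          have := hP _ hx
          omega
        rw [if_neg hcase]
        exact ih lo _ (by omega) h1 (by omega) (by omega)
    · rw [pvBisect, if_neg hlh]
      omega

-- the positions dict holds exactly occFrom
lemma zipIdx_filter_map (c : Char) : ∀ (s : List Char) (k : Nat),
    List.map (fun x => x.2) (List.filter (fun p => p.1 == c) (s.zipIdx k)) = occFrom c s k := by
  intro s
  induction s with
  | nil => intro k; simp [occFrom]
  | cons a rest ih =>
    intro k
    rw [List.zipIdx_cons]
    by_cases hc : a = c
    · simp [occFrom, hc, ih]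
    · simp [occFrom, hc, ih]

lemma pvBuildPos_getD (s : List Char) (c : Char) :
    (pvBuildPos s).getD c [] = occFrom c s 0 := by
  unfold pvBuildPos
  rw [PySem.Dict.getD_foldl_modify_append]
  rw [zipIdx_filter_map]
  simp [PySem.Dict.empty, PySem.Dict.getD, PySem.Dict.get?]

lemma pvStepB_eq (s : List Char) (c : Char) (count : Int) (cur : Nat) :
    pvStepB (pvBuildPos s) (some (count, cur)) c =
      match pvNxt s c cur with
      | some j => some (count, j + 1)
      | none =>
        match pvNxt s c 0 with
        | some j => some (count + 1, j + 1)
        | none => none := by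
  have hsplit : occFrom c s 0 = occFrom c (s.take cur) 0 ++ occFrom c (s.drop cur) cur := by
    have := occFrom_split (c := c) s 0 cur
    simpa using this
  set P := occFrom c (s.take cur) 0 with hPdef
  set Q := occFrom c (s.drop cur) cur with hQdef
  have hP : ∀ j ∈ P, j < cur := by
    intro j hj
    have h1 := occFrom_ub (c := c) (s.take cur) 0 j hj
    have h2 : (s.take cur).length ≤ cur := by simp
    omega
  have hQ : ∀ j ∈ Q, cur ≤ j := fun j hj => occFrom_lb (c := c) (s.drop cur) cur j hj
  have hnxt : pvNxt s c cur = Q.head? := pvNxt_eq_head s c cur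
  have hnxt0 : pvNxt s c 0 = (occFrom c s 0).head? := by
    simpa using pvNxt_eq_head s c 0
  simp only [pvStepB, pvBuildPos_getD, hsplit]
  by_cases hO : P ++ Q = []
  · -- character absent from source entirely
    have hPQ := List.append_eq_nil_iff.mp hO
    rw [if_pos hO]
    have h1 : pvNxt s c cur = none := by rw [hnxt, hPQ.2]; rfl
    have h2 : pvNxt s c 0 = none := by rw [hnxt0, hsplit, hO]; rfl
    simp [h1, h2]
  · rw [if_neg hO]
    have hbis : pvBisect (P ++ Q) cur ((P ++ Q).length + 1) 0 (P ++ Q).length = P.length := by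
      apply pvBisect_eq_fuel P Q cur hP hQ ((P ++ Q).length + 1) 0 (P ++ Q).length
        (by omega) (by omega) (by simp) (by simp)
    rw [hbis]
    by_cases hQn : Q = []
    · -- no occurrence at or after cur: wraparound
      have hlen : P.length = (P ++ Q).length := by simp [hQn]
      rw [if_pos hlen]
      have hPne : P ≠ [] := by intro h; exact hO (by simp [h, hQn])
      have hnone : pvNxt s c cur = none := by rw [hnxt, hQn]; rfl
      have h0 : pvNxt s c 0 = some ((P ++ Q).getD 0 0) := by
        rw [hnxt0, hsplit]
        cases hp : P with
        | nil => exact absurd hp hPne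
        | cons x xs => simp
      simp [hnone, h0]
    · -- next occurrence exists: it is (P ++ Q)[P.length]
      have hlen : ¬ P.length = (P ++ Q).length := by
        simp only [List.length_append]
        have : 0 < Q.length := List.length_pos_iff.mpr hQn
        omega
      rw [if_neg hlen]
      have hplen : P.length < (P ++ Q).length := by
        simp only [List.length_append]
        have : 0 < Q.length := List.length_pos_iff.mpr hQn
        omega
      have hget : (P ++ Q).getD P.length 0 = Q.getD 0 0 := by
        rw [List.getD_eq_getElem _ 0 hplen, List.getElem_append_right le_rfl]
        have h0 : 0 < Q.length := List.length_pos_iff.mpr hQn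
        rw [List.getD_eq_getElem _ 0 (by omega)]
        congr 1
        omega
      rw [hget, hnxt]
      cases hq : Q with
      | nil => exact absurd hq hQn
      | cons x xs => simp

lemma pvFoldB_none (pos : PySem.Dict Char (List Nat)) :
    ∀ ts : List Char, ts.foldl (pvStepB pos) none = none := by
  intro ts; induction ts with
  | nil => rfl
  | cons c rest ih => simpa [pvStepB] using ih

lemma pvFoldB_eq (s : List Char) : ∀ (ts : List Char) (cur : Nat) (count : Int),
    (match ts.foldl (pvStepB (pvBuildPos s)) (some (count, cur)) with
     | none => (-1 : Int)
     | some (cnt, _) => cnt) = pvF s ts cur count := by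
  intro ts
  induction ts with
  | nil => intro cur count; rfl
  | cons c rest ih =>
    intro cur count
    rw [List.foldl_cons, pvStepB_eq]
    cases h : pvNxt s c cur with
    | some j => simp only [pvF, h]; exact ih (j + 1) count
    | none =>
      cases h0 : pvNxt s c 0 with
      | some j => simp only [pvF, h, h0]; exact ih (j + 1) (count + 1)
      | none => simp only [pvF, h, h0, pvFoldB_none]

-- pvF ignores a mismatching source position / wraps when no occurrence remains
lemma pvF_skip {s : List Char} {c : Char} (rest : List Char) {cur : Nat} (count : Int)
    (h : pvNxt s c cur = pvNxt s c (cur + 1)) :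
    pvF s (c :: rest) cur count = pvF s (c :: rest) (cur + 1) count := by
  simp only [pvF, h]

lemma pvF_wrap {s : List Char} {c : Char} (rest : List Char) {cur : Nat} (count : Int)
    (h : pvNxt s c cur = none) :
    pvF s (c :: rest) cur count = pvF s (c :: rest) 0 (count + 1) := by
  cases h0 : pvNxt s c 0 with
  | some j => simp only [pvF, h, h0]
  | none => simp only [pvF, h, h0]

lemma pvInnerA_stop {s t : List Char} {S : PySem.Set Char} {pt1 pt2 : Nat} (fuel : Nat)
    (h : ¬ (pt1 < s.length ∧ pt2 < t.length)) :
    pvInnerA s t S fuel pt1 pt2 = some pt2 := by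
  cases fuel with
  | zero => rfl
  | succ f => rw [pvInnerA, if_neg h]

-- A-side: one inner pass equals the pvF recursion
lemma pvInnerA_eq (s t : List Char) : ∀ fuel1 fuel2 pt2 pt1 (count : Int),
    t.length - pt2 ≤ fuel1 → s.length - pt1 ≤ fuel2 → pt2 ≤ t.length →
    (pvInnerA s t (PySem.Set.ofList s) fuel2 pt1 pt2 = none →
        pvF s (t.drop pt2) pt1 count = -1) ∧
    (∀ pt2', pvInnerA s t (PySem.Set.ofList s) fuel2 pt1 pt2 = some pt2' →
        pt2 ≤ pt2' ∧ pt2' ≤ t.length ∧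
        pvF s (t.drop pt2) pt1 count =
          (if pt2' < t.length then pvF s (t.drop pt2') 0 (count + 1) else count) ∧
        (pvNxt s (t.getD pt2 ' ') pt1 ≠ none → pt2 < t.length → pt2 < pt2')) := by
  intro fuel1
  induction fuel1 with
  | zero =>
    intro fuel2 pt2 pt1 count h1 h2 h3
    have hpt2 : pt2 = t.length := by omega
    subst hpt2
    rw [pvInnerA_stop fuel2 (by omega)]
    constructor
    · intro h; simp at h
    · intro pt2' h
      have : pt2' = t.length := by simpa using h.symm
      subst this
      refine ⟨le_rfl, le_rfl, ?_, ?_⟩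
      · simp [pvF]
      · intro _ h; omega
  | succ f1 ih1 =>
    intro fuel2
    induction fuel2 with
    | zero =>
      intro pt2 pt1 count h1 h2 h3
      rw [pvInnerA_stop 0 (by omega)]
      constructor
      · intro h; simp at h
      · intro pt2' h
        have he : pt2' = pt2 := by simpa using h.symm
        subst he
        refine ⟨le_rfl, h3, ?_, ?_⟩
        · by_cases hlt : pt2' < t.length
          · rw [if_pos hlt]
            rw [List.drop_eq_getElem_cons hlt]
            exact pvF_wrap _ count (pvNxt_neg (by omega))
          · rw [if_neg hlt]
            rw [List.drop_eq_nil_of_le (by omega)]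
            rfl
        · intro hne _
          exact absurd (pvNxt_neg (show ¬ pt1 < s.length by omega)) hne
    | succ f2 ih2 =>
      intro pt2 pt1 count h1 h2 h3
      by_cases hpt2 : pt2 < t.length
      · by_cases hpt1 : pt1 < s.length
        · -- both in range: A checks membership, then compares
          have hcond : pt1 < s.length ∧ pt2 < t.length := ⟨hpt1, hpt2⟩
          have hgetd : t.getD pt2 ' ' = t[pt2] := List.getD_eq_getElem t ' ' hpt2
          have hdrop : t.drop pt2 = t[pt2] :: t.drop (pt2 + 1) :=
            List.drop_eq_getElem_cons hpt2
          by_cases hcon : PySem.Set.contains (PySem.Set.ofList s) (t.getD pt2 ' ') = true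
          · have hmem : t[pt2] ∈ s := by
              rw [hgetd] at hcon
              have := (PySem.Set.mem_ofList s t[pt2]).mp (by
                simpa [PySem.Set.contains] using hcon)
              exact this
            by_cases heq : s.getD pt1 ' ' = t.getD pt2 ' '
            · -- match: pt1+1, pt2+1
              have heq' : s[pt1] = t[pt2] := by
                rw [← List.getD_eq_getElem s ' ' hpt1, ← hgetd]; exact heq
              have hstep : pvInnerA s t (PySem.Set.ofList s) (f2 + 1) pt1 pt2 =
                  pvInnerA s t (PySem.Set.ofList s) f2 (pt1 + 1) (pt2 + 1) := by
                rw [pvInnerA]; simp [hcond, hmem, heq']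
              have hnx : pvNxt s t[pt2] pt1 = some pt1 := by
                rw [pvNxt_pos hpt1]
                rw [List.getD_eq_getElem s ' ' hpt1, hgetd] at heq
                simp [heq]
              have hFstep : pvF s (t.drop pt2) pt1 count =
                  pvF s (t.drop (pt2 + 1)) (pt1 + 1) count := by
                rw [hdrop]; simp only [pvF, hnx]
              have IH := ih1 f2 (pt2 + 1) (pt1 + 1) count
                (by omega) (by omega) (by omega)
              constructor
              · intro h
                rw [hstep] at h
                rw [hFstep]
                exact IH.1 h
              · intro pt2' h
                rw [hstep] at h
                obtain ⟨ha, hb, hc, _⟩ := IH.2 pt2' h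
                exact ⟨by omega, hb, by rw [hFstep]; exact hc, fun _ _ => by omega⟩
            · -- mismatch: pt1+1, same pt2
              have heq' : ¬ s[pt1] = t[pt2] := by
                rw [← List.getD_eq_getElem s ' ' hpt1, ← hgetd]; exact heq
              have hstep : pvInnerA s t (PySem.Set.ofList s) (f2 + 1) pt1 pt2 =
                  pvInnerA s t (PySem.Set.ofList s) f2 (pt1 + 1) pt2 := by
                rw [pvInnerA]; simp [hcond, hmem, heq']
              have hnx : pvNxt s t[pt2] pt1 = pvNxt s t[pt2] (pt1 + 1) := by
                rw [pvNxt_pos hpt1]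
                rw [List.getD_eq_getElem s ' ' hpt1, hgetd] at heq
                simp [heq]
              have hFstep : pvF s (t.drop pt2) pt1 count =
                  pvF s (t.drop pt2) (pt1 + 1) count := by
                rw [hdrop]; exact pvF_skip _ count hnx
              have IH := ih2 pt2 (pt1 + 1) count h1 (by omega) h3
              constructor
              · intro h
                rw [hstep] at h
                rw [hFstep]
                exact IH.1 h
              · intro pt2' h
                rw [hstep] at h
                obtain ⟨ha, hb, hc, hd⟩ := IH.2 pt2' h
                refine ⟨ha, hb, by rw [hFstep]; exact hc, ?_⟩
                intro hne hlt
                rw [hgetd, hnx] at hne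
                exact hd (by rw [hgetd]; exact hne) hlt
          · -- char not in source: A returns -1, pvF returns -1
            have hnotmem : t[pt2] ∉ s := by
              rw [hgetd] at hcon
              intro hm
              exact hcon (by simpa [PySem.Set.contains] using
                (PySem.Set.mem_ofList s t[pt2]).mpr hm)
            have hstep : pvInnerA s t (PySem.Set.ofList s) (f2 + 1) pt1 pt2 = none := by
              rw [pvInnerA]; simp [hcond, hnotmem]
            have hnone : ∀ i, pvNxt s t[pt2] i = none := by
              intro i
              rw [pvNxt_none_iff]
              intro hm
              exact hnotmem (List.drop_subset i s hm)
            constructor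
            · intro _
              rw [hdrop]
              simp only [pvF, hnone]
            · intro pt2' h
              rw [hstep] at h
              simp at h
        · -- pt1 out of range: inner loop exits with some pt2
          rw [pvInnerA_stop (f2 + 1) (by omega)]
          constructor
          · intro h; simp at h
          · intro pt2' h
            have he : pt2' = pt2 := by simpa using h.symm
            subst he
            refine ⟨le_rfl, h3, ?_, ?_⟩
            · rw [if_pos hpt2]
              rw [List.drop_eq_getElem_cons hpt2]
              exact pvF_wrap _ count (pvNxt_neg (by omega))
            · intro hne _
              exact absurd (pvNxt_neg (show ¬ pt1 < s.length by omega)) hne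
      · -- pt2 = t.length
        have hpt2' : pt2 = t.length := by omega
        subst hpt2'
        rw [pvInnerA_stop (f2 + 1) (by omega)]
        constructor
        · intro h; simp at h
        · intro pt2' h
          have : pt2' = t.length := by simpa using h.symm
          subst this
          refine ⟨le_rfl, le_rfl, ?_, ?_⟩
          · simp [pvF]
          · intro _ h; omega

lemma pvOuterA_eq (s t : List Char) (hs : s ≠ []) : ∀ (fuel pt2 : Nat) (count : Int),
    pt2 ≤ t.length → t.length - pt2 < fuel →
    pvOuterA s t (PySem.Set.ofList s) fuel pt2 count =
      (if pt2 < t.length then pvF s (t.drop pt2) 0 (count + 1) else count) := by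
  intro fuel
  induction fuel with
  | zero => intro pt2 count h1 h2; omega
  | succ f ih =>
    intro pt2 count h1 h2
    by_cases hlt : pt2 < t.length
    · rw [pvOuterA, if_pos hlt]
      cases hin : pvInnerA s t (PySem.Set.ofList s) (s.length + 1) 0 pt2 with
      | none =>
        have := (pvInnerA_eq s t (t.length - pt2) (s.length + 1) pt2 0 (count + 1)
          le_rfl (by omega) h1).1 hin
        rw [if_pos hlt, this]
      | some pt2' =>
        -- derive membership of t[pt2] from the fact that the pass did not return -1
        have hmem : pvNxt s (t.getD pt2 ' ') 0 ≠ none := by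
          rw [pvInnerA] at hin
          have hcond : 0 < s.length ∧ pt2 < t.length :=
            ⟨List.length_pos_iff.mpr hs, hlt⟩
          rw [if_pos hcond] at hin
          by_cases hcon : PySem.Set.contains (PySem.Set.ofList s) (t.getD pt2 ' ') = true
          · have hcs : t.getD pt2 ' ' ∈ s :=
              (PySem.Set.mem_ofList s _).mp (by simpa [PySem.Set.contains] using hcon)
            rw [Ne, pvNxt_none_iff]
            simpa using hcs
          · rw [if_neg hcon] at hin
            simp at hin
        have IH := pvInnerA_eq s t (t.length - pt2) (s.length + 1) pt2 0 (count + 1)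
          le_rfl (by omega) h1
        obtain ⟨ha, hb, hc, hd⟩ := IH.2 pt2' hin
        have hprog : pt2 < pt2' := hd hmem hlt
        change pvOuterA s t (PySem.Set.ofList s) f pt2' (count + 1) = _
        rw [ih pt2' (count + 1) hb (by omega)]
        rw [if_pos hlt, hc]
    · rw [pvOuterA, if_neg hlt, if_neg hlt]

-- ===== VERDICT (by name: the statement is the Claim_ definition above) =====
theorem shortestWay_spec : Claim_equal_shortestWay := by
  intro source target _hdom hpre
  unfold Spec_shortestWay shortestWay shortestWay_alt
  by_cases ht : target.toList = []
  · simp [ht, pvOuterA]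
  · have hs : source.toList ≠ [] := by
      rcases hpre with h | h
      · intro hc; exact h (String.toList_eq_nil_iff.mp hc)
      · exact absurd (by simpa [String.toList_eq_nil_iff] using h) ht
    have hlen : 0 < target.toList.length := List.length_pos_iff.mpr ht
    have hA : pvOuterA source.toList target.toList (PySem.Set.ofList source.toList)
        (target.toList.length + 1) 0 0 = pvF source.toList target.toList 0 1 := by
      rw [pvOuterA_eq source.toList target.toList hs (target.toList.length + 1) 0 0
        (by omega) (by omega)]
      rw [if_pos hlen, List.drop_zero]
      norm_num
    rw [hA]
    show pvF source.toList target.toList 0 1 =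
      match List.foldl (pvStepB (pvBuildPos source.toList)) (some (1, 0)) target.toList with
      | none => (-1 : Int)
      | some (count, _) => if target.toList = [] then 0 else count
    rw [← pvFoldB_eq source.toList target.toList 0 1]
    cases List.foldl (pvStepB (pvBuildPos source.toList)) (some (1, 0)) target.toList with
    | none => rfl
    | some p =>
      obtain ⟨cnt, cur⟩ := p
      simp [ht]
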